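-- pv_equiv track=rewrite | github.com/benquick123/code-profiling | code/batch-1/vse-naloge-brez-testov/DN6-M-153.py | omembe
-- ===== SOURCE A (Python) =====
-- def unikati(seznam):
--     #vrne enoličen seznam brez ponovljenih elementov
--     novSeznam = []
--     for element in seznam:
--         if element in novSeznam:
--             continue
--         else:
--             novSeznam.append(element)
--     return novSeznam
--
-- def avtor(tvit):
--     #vrne avtorja tvita
--     tvit = tvit.split(":")
--     return tvit[0]
--
-- def vsi_avtorji(seznam):
--     #vrne vse avotrje tvitov v nekem seznami tvitov
--     seznamAvtorjev = []
--     for element in seznam: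
--         seznamAvtorjev.append(avtor(element))
--     seznamAvtorjev = unikati(seznamAvtorjev)
--     return seznamAvtorjev
--
-- def izloci_besedo(beseda):
--     #funkcija izloči vse ne alfanumerične znake pred in za podano besedo
--     novaBeseda = beseda
--     for i in range(len(beseda)):
--         if beseda[i].isalnum():
--             break
--         else:
--             novaBeseda = beseda[i+1:]
--     for j in range(len(novaBeseda)-1,0,-1):
--         if novaBeseda[j].isalnum():
--             break
--         else:
--             novaBeseda = novaBeseda[:j]
--     return novaBeseda
--
-- def omembe(tviti):
--     slovar = {}
--     avtorji = vsi_avtorji(tviti)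
--     for posamezniAvtor in avtorji:
--         slovar[posamezniAvtor]= []
--         for tvit in tviti:
--             tvit = tvit.split()
--             oseba = tvit[0]
--             if oseba[:-1] == posamezniAvtor:
--                 for element in tvit:
--                     if element[0] == "@":
--                         slovar[posamezniAvtor].append(izloci_besedo(element))
--     return slovar
-- ===== SOURCE B (Python) =====
-- def _jedro(w):
--     # strip non-alphanumeric characters from both ends
--     i = 0
--     while i < len(w) and not w[i].isalnum():
--         i += 1
--     j = len(w)
--     while j > i and not w[j - 1].isalnum():
--         j -= 1
--     return w[i:j]
--
-- def omembe(tviti):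
--     slovar = {}
--     for tvit in tviti:
--         slovar.setdefault(tvit.split(":")[0], [])
--     for tvit in tviti:
--         besede = tvit.split()
--         kljuc = besede[0][:-1]
--         if kljuc in slovar:
--             slovar[kljuc].extend(_jedro(b) for b in besede if b.startswith("@"))
--     return slovar
-- ===== Notes on version B (the rewrite author's own statement) =====
-- stated objective: faster
-- what changed: A rescans the whole tweet list once per distinct author (and re-derives each author's mentions word by word); B makes two linear passes over the tweets: one pass registering each author key, one pass splitting each tweet once and appending its mentions to the dict entry of its header key.
import Mathlib
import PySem

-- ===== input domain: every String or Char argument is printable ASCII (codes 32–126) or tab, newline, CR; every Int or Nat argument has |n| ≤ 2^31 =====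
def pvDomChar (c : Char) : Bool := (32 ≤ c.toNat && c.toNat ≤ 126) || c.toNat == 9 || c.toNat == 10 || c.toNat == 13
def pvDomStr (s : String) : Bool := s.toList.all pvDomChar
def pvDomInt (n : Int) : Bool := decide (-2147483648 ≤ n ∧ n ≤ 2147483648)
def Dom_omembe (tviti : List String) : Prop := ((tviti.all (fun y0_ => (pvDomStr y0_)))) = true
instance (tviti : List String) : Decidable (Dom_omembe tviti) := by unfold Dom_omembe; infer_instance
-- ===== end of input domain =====

-- B replaces A's author-by-author rescan of all tweets (O(authors × tweets)) by two linear passes over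
-- the tweets with a dict keyed by author; return values proved equal wherever the Python A returns.

-- ===== PORT A =====
def unikatiA (seznam : List String) : List String :=
  seznam.foldl (fun novSeznam element =>
    if element ∈ novSeznam then novSeznam else novSeznam ++ [element]) []

-- tvit.split(":")[0]; ':' is a nonempty separator so split? is always `some` and the list nonempty
def avtorA (tvit : String) : String :=
  PySem.List.pyGetD ((PySem.Str.split? tvit ":").getD []) 0 ""

def vsiAvtorjiA (seznam : List String) : List String :=
  unikatiA (seznam.foldl (fun seznamAvtorjev element => seznamAvtorjev ++ [avtorA element]) [])

-- first loop of izloci_besedo: i walks forward, novaBeseda := beseda[i+1:] until an alnum char breaks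
def izlociLeadA (beseda : List Char) (i : Nat) (novaBeseda : List Char) : List Char :=
  if h : i < beseda.length then
    if PySem.Chars.isalnum beseda[i] then novaBeseda
    else izlociLeadA beseda (i + 1) (PySem.List.slice beseda (some ((i : Int) + 1)) none)
  else novaBeseda
termination_by beseda.length - i

-- second loop: j walks from len-1 down to 1, novaBeseda := novaBeseda[:j] until an alnum char breaks
def izlociTrailA (novaBeseda : List Char) (j : Nat) : List Char :=
  if j = 0 then novaBeseda
  else if PySem.Chars.isalnum (PySem.List.pyGetD novaBeseda (j : Int) ' ') then novaBeseda
  else izlociTrailA (PySem.List.slice novaBeseda none (some (j : Int))) (j - 1)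
termination_by j

def izlociBesedoA (beseda : String) : String :=
  let nova := izlociLeadA beseda.toList 0 beseda.toList
  String.ofList (izlociTrailA nova (nova.length - 1))

-- innermost loop: for element in tvit.split(): if element[0] == "@": slovar[a].append(izloci_besedo(element))
def zankaBesedA (posamezniAvtor : String) (slovar : PySem.Dict String (List String))
    (besede : List String) : PySem.Dict String (List String) :=
  besede.foldl (fun slovar element =>
    if PySem.List.pyGet? element.toList 0 == some '@' then
      slovar.modify posamezniAvtor [] (fun v => v ++ [izlociBesedoA element])
    else slovar) slovar

-- middle loop: for tvit in tviti: …
def zankaTvitovA (tviti : List String) (posamezniAvtor : String)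
    (slovar : PySem.Dict String (List String)) : PySem.Dict String (List String) :=
  tviti.foldl (fun slovar tvit =>
    let besede := PySem.Str.split₀ tvit
    let oseba := PySem.List.pyGetD besede 0 ""
    if PySem.Str.slice oseba none (some (-1)) == posamezniAvtor then
      zankaBesedA posamezniAvtor slovar besede
    else slovar) slovar

def omembe (tviti : List String) : List (String × List String) :=
  ((vsiAvtorjiA tviti).foldl (fun slovar posamezniAvtor =>
      zankaTvitovA tviti posamezniAvtor (slovar.insert posamezniAvtor []))
    PySem.Dict.empty).items

-- ===== PORT B =====
-- _jedro: first while loop, index of the first alphanumeric character at or after i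
def jedroZacB (w : List Char) (i : Nat) : Nat :=
  if h : i < w.length then
    if PySem.Chars.isalnum w[i] then i else jedroZacB w (i + 1)
  else i
termination_by w.length - i

-- _jedro: second while loop, decrements j while w[j-1] is not alphanumeric and j > i
def jedroKonB (w : List Char) (i j : Nat) : Nat :=
  if i < j then
    if PySem.Chars.isalnum (PySem.List.pyGetD w ((j : Int) - 1) ' ') then j
    else jedroKonB w i (j - 1)
  else j
termination_by j

def jedroB (w : String) : String :=
  let i := jedroZacB w.toList 0
  let j := jedroKonB w.toList i w.toList.length
  String.ofList (PySem.List.slice w.toList (some (i : Int)) (some (j : Int)))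

-- second pass: one tweet's mentions appended at once under the key besede[0][:-1], if it is a known author
def prehod2B (slovar : PySem.Dict String (List String)) (tvit : String) :
    PySem.Dict String (List String) :=
  let besede := PySem.Str.split₀ tvit
  let kljuc := PySem.Str.slice (PySem.List.pyGetD besede 0 "") none (some (-1))
  if slovar.contains kljuc then
    slovar.modify kljuc [] (fun v =>
      v ++ (besede.filter (fun b => PySem.Str.startswith b "@")).map jedroB)
  else slovar

def omembe_alt (tviti : List String) : List (String × List String) :=
  (tviti.foldl prehod2B
    (tviti.foldl (fun slovar tvit =>
        slovar.setdefault (PySem.List.pyGetD ((PySem.Str.split? tvit ":").getD []) 0 "") [])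
      PySem.Dict.empty)).items

-- ===== PRECONDITION & SPEC =====
-- Pre_ excludes inputs containing an empty or whitespace-only tweet: there Python A (and Python B)
-- raises IndexError on tvit.split()[0].
def Pre_omembe (tviti : List String) : Prop := ∀ t ∈ tviti, PySem.Str.split₀ t ≠ []
instance (tviti : List String) : Decidable (Pre_omembe tviti) := by unfold Pre_omembe; infer_instance

def pvWitness_omembe : List String := ["ana: zdravo @bob!", "bob: @ana @cilka, hej"]

def Spec_omembe (tviti : List String) (out : List (String × List String)) : Prop := out = omembe_alt tviti
instance (tviti : List String) (out : List (String × List String)) : Decidable (Spec_omembe tviti out) := by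
  unfold Spec_omembe; infer_instance

-- ===== CLAIM (what is proved, stated in full; the proofs are below) =====
def Claim_equal_omembe : Prop := ∀ (tviti : List String), Dom_omembe tviti → Pre_omembe tviti → Spec_omembe tviti (omembe tviti)

-- ===== LEMMAS AND PROOFS =====

def neAlnum (c : Char) : Bool := !PySem.Chars.isalnum c

def kanon (cs : List Char) : List Char :=
  ((cs.dropWhile neAlnum).reverse.dropWhile neAlnum).reverse

def besedeT (t : String) : List String := PySem.Str.split₀ t

def kljucT (t : String) : String :=
  PySem.Str.slice (PySem.List.pyGetD (besedeT t) 0 "") none (some (-1))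

def omembeT (t : String) : List String :=
  ((besedeT t).filter (fun e => PySem.List.pyGet? e.toList 0 == some '@')).map izlociBesedoA

def prispevek (tviti : List String) (a : String) : List String :=
  tviti.flatMap (fun t => if kljucT t = a then omembeT t else [])

theorem izlociLeadA_eq (b : List Char) : ∀ i, izlociLeadA b i (b.drop i) = (b.drop i).dropWhile neAlnum := by
  intro i
  induction' hn : b.length - i using Nat.strong_induction_on with n IH generalizing i
  rw [izlociLeadA]
  by_cases h : i < b.length
  · simp only [dif_pos h]
    rw [List.drop_eq_getElem_cons h]
    by_cases ha : PySem.Chars.isalnum b[i] = true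
    · rw [if_pos ha, List.dropWhile_cons]
      simp [neAlnum, ha, ← List.drop_eq_getElem_cons h]
    · have hs : PySem.List.slice b (some ((i : Int) + 1)) none = b.drop (i+1) := by
        have : ((i : Int) + 1) = ((i + 1 : Nat) : Int) := by push_cast; ring
        rw [this, PySem.List.slice_from_natCast]
      simp only [if_neg ha, hs]
      rw [List.dropWhile_cons]
      simp only [neAlnum, ha, Bool.not_false, if_pos]
      exact IH (b.length - (i+1)) (by omega) (i+1) rfl
  · simp [dif_neg h, List.drop_eq_nil_of_le (by omega : b.length ≤ i)]

theorem izlociTrailA_eq (r : List Char) (hd : ∀ h : r ≠ [], PySem.Chars.isalnum (r.head h) = true) :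
    izlociTrailA r (r.length - 1) = (r.reverse.dropWhile neAlnum).reverse := by
  induction' hn : r.length using Nat.strong_induction_on with n IH generalizing r
  subst hn
  rw [izlociTrailA]
  by_cases h1 : r.length - 1 = 0
  · rw [if_pos h1]
    match r, hd with
    | [], _ => simp
    | [c], hd =>
      have := hd (by simp)
      simp only [List.head_cons] at this
      simp [neAlnum, this]
    | c1 :: c2 :: t, _ => simp at h1
  · rw [if_neg h1]
    have hlen : 2 ≤ r.length := by omega
    have hne : r ≠ [] := by intro h; subst h; simp at hlen
    have hj : r.length - 1 < r.length := by omega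
    have hget : PySem.List.pyGetD r ((r.length - 1 : Nat) : Int) ' ' = r.getLast hne := by
      rw [PySem.List.pyGetD_natCast]
      rw [List.getD_eq_getElem _ _ hj, List.getLast_eq_getElem]
    have hsplit : r = r.dropLast ++ [r.getLast hne] := (List.dropLast_append_getLast hne).symm
    by_cases ha : PySem.Chars.isalnum (r.getLast hne) = true
    · rw [if_pos (by rw [hget]; exact ha)]
      conv_rhs => rw [hsplit]
      rw [List.reverse_append, List.reverse_singleton, List.singleton_append, List.dropWhile_cons]
      rw [if_neg (by simp [neAlnum, ha])]
      rw [show r.getLast hne :: r.dropLast.reverse = (r.dropLast ++ [r.getLast hne]).reverse by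
            rw [List.reverse_append, List.reverse_singleton, List.singleton_append]]
      rw [List.reverse_reverse, ← hsplit]
    · rw [if_neg (by rw [hget]; simpa using ha)]
      have hslice : PySem.List.slice r none (some ((r.length - 1 : Nat) : Int)) = r.dropLast := by
        rw [PySem.List.slice_to_natCast, List.dropLast_eq_take]
      rw [hslice]
      have hdl : r.dropLast.length = r.length - 1 := by simp
      have hdlne : r.dropLast ≠ [] := by
        intro hh
        have := congrArg List.length hh; simp [hdl] at this; omega
      have hdhd : ∀ h : r.dropLast ≠ [], PySem.Chars.isalnum (r.dropLast.head h) = true := by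
        intro hh
        have : r.dropLast.head hh = r.head hne := by
          rw [List.head_eq_getElem, List.head_eq_getElem]
          rw [List.getElem_dropLast]
        rw [this]; exact hd hne
      have := IH (r.length - 1) (by omega) r.dropLast hdhd (by omega)
      rw [show r.length - 1 - 1 = r.dropLast.length - 1 by omega] at *
      rw [this]
      conv_rhs => rw [hsplit]
      rw [List.reverse_append, List.reverse_singleton, List.singleton_append, List.dropWhile_cons]
      simp [neAlnum, ha]

theorem izlociBesedoA_eq (w : String) : izlociBesedoA w = String.ofList (kanon w.toList) := by
  unfold izlociBesedoA
  show String.ofList (izlociTrailA (izlociLeadA w.toList 0 w.toList)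
    ((izlociLeadA w.toList 0 w.toList).length - 1)) = _
  have h0 : izlociLeadA w.toList 0 w.toList = w.toList.dropWhile neAlnum := by
    have := izlociLeadA_eq w.toList 0
    simpa using this
  rw [h0]
  congr 1
  have hd : ∀ h : (w.toList.dropWhile neAlnum) ≠ [],
      PySem.Chars.isalnum ((w.toList.dropWhile neAlnum).head h) = true := by
    intro h
    have := List.head_dropWhile_not neAlnum h
    simpa [neAlnum] using this
  exact izlociTrailA_eq _ hd

theorem jedroZacB_spec (w : List Char) : ∀ i, i ≤ w.length →
    i ≤ jedroZacB w i ∧ jedroZacB w i ≤ w.length ∧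
      w.drop (jedroZacB w i) = (w.drop i).dropWhile neAlnum := by
  intro i
  induction' hn : w.length - i using Nat.strong_induction_on with n IH generalizing i
  intro hi
  rw [jedroZacB]
  by_cases h : i < w.length
  · rw [dif_pos h]
    by_cases ha : PySem.Chars.isalnum w[i] = true
    · rw [if_pos ha]
      refine ⟨le_refl _, le_of_lt h, ?_⟩
      rw [List.drop_eq_getElem_cons h, List.dropWhile_cons]
      simp [neAlnum, ha, ← List.drop_eq_getElem_cons h]
    · rw [if_neg ha]
      obtain ⟨h1, h2, h3⟩ := IH (w.length - (i+1)) (by omega) (i+1) rfl (by omega)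
      refine ⟨by omega, h2, ?_⟩
      rw [h3, List.drop_eq_getElem_cons h, List.dropWhile_cons]
      simp [neAlnum, ha]
  · rw [dif_neg h]
    have : i = w.length := by omega
    subst this
    simp

theorem jedroKonB_spec (w : List Char) (i : Nat) : ∀ j, i ≤ j → j ≤ w.length →
    i ≤ jedroKonB w i j ∧ jedroKonB w i j ≤ j ∧
      (w.take (jedroKonB w i j)).drop i = (((w.take j).drop i).reverse.dropWhile neAlnum).reverse := by
  intro j
  induction' j using Nat.strong_induction_on with j IH
  intro hij hj
  rw [jedroKonB]
  by_cases h : i < j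
  · rw [if_pos h]
    obtain ⟨j', rfl⟩ : ∃ j', j = j' + 1 := ⟨j - 1, by omega⟩
    simp only [Nat.add_sub_cancel]
    have hj1 : j' < w.length := by omega
    have hget : PySem.List.pyGetD w (((j' + 1 : Nat) : Int) - 1) ' ' = w[j'] := by
      rw [show (((j' + 1 : Nat) : Int) - 1) = ((j' : Nat) : Int) by omega]
      rw [PySem.List.pyGetD_natCast, List.getD_eq_getElem _ _ hj1]
    have hsplit : (w.take (j' + 1)).drop i = ((w.take j').drop i) ++ [w[j']] := by
      rw [List.take_add_one, List.getElem?_eq_getElem hj1]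
      simp only [Option.toList_some]
      rw [List.drop_append_of_le_length (by simp; omega)]
    by_cases ha : PySem.Chars.isalnum w[j'] = true
    · rw [if_pos (by rw [hget]; exact ha)]
      refine ⟨by omega, le_refl _, ?_⟩
      rw [hsplit, List.reverse_append, List.reverse_singleton, List.singleton_append,
        List.dropWhile_cons]
      rw [if_neg (by simp [neAlnum, ha])]
      rw [show w[j'] :: ((w.take j').drop i).reverse = (((w.take j').drop i) ++ [w[j']]).reverse by
            rw [List.reverse_append, List.reverse_singleton, List.singleton_append]]
      rw [List.reverse_reverse, ← hsplit]
    · rw [if_neg (by rw [hget]; simpa using ha)]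
      obtain ⟨h1, h2, h3⟩ := IH j' (by omega) (by omega) (by omega)
      refine ⟨h1, by omega, ?_⟩
      rw [h3, hsplit, List.reverse_append, List.reverse_singleton, List.singleton_append,
        List.dropWhile_cons]
      rw [if_pos (by simp [neAlnum, ha])]
  · rw [if_neg h]
    have : i = j := by omega
    subst this
    simp

theorem jedroB_eq (w : String) : jedroB w = String.ofList (kanon w.toList) := by
  unfold jedroB
  show String.ofList (PySem.List.slice w.toList (some ((jedroZacB w.toList 0 : Nat) : Int))
    (some ((jedroKonB w.toList (jedroZacB w.toList 0) w.toList.length : Nat) : Int))) = _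
  obtain ⟨z1, z2, z3⟩ := jedroZacB_spec w.toList 0 (by omega)
  obtain ⟨k1, k2, k3⟩ := jedroKonB_spec w.toList (jedroZacB w.toList 0) w.toList.length z2 (le_refl _)
  congr 1
  rw [PySem.List.slice_natCast, List.take_drop]
  rw [show jedroZacB w.toList 0 +
      (jedroKonB w.toList (jedroZacB w.toList 0) w.toList.length - jedroZacB w.toList 0) =
      jedroKonB w.toList (jedroZacB w.toList 0) w.toList.length by omega]
  simp only [List.drop_zero] at z3
  rw [k3, List.take_length, z3, kanon]

theorem strip_eq (w : String) : jedroB w = izlociBesedoA w := by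
  rw [jedroB_eq, izlociBesedoA_eq]

theorem startswith_at_eq (b : String) :
    PySem.Str.startswith b "@" = (PySem.List.pyGet? b.toList 0 == some '@') := by
  have hs : PySem.Str.startswith b "@" = PySem.Chars.startswith b.toList ['@'] := by
    simp [PySem.Str.startswith]
  rw [hs]
  apply Bool.eq_iff_iff.mpr
  rw [PySem.Chars.startswith_iff]
  cases hb : b.toList with
  | nil => simp [PySem.List.pyGet?]
  | cons c t =>
    rw [PySem.List.pyGet?_zero_cons]
    simp only [List.cons_prefix_cons, List.nil_prefix, and_true, beq_iff_eq, Option.some.injEq]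
    exact eq_comm

theorem zankaBesedA_getD (a : String) (bs : List String) :
    ∀ (d : PySem.Dict String (List String)) (k : String),
      (zankaBesedA a d bs).getD k [] =
        d.getD k [] ++ (if k = a then ((bs.filter (fun e => PySem.List.pyGet? e.toList 0 == some '@')).map izlociBesedoA) else []) := by
  induction bs with
  | nil => intro d k; simp [zankaBesedA]
  | cons e bs IH =>
    intro d k
    rw [zankaBesedA, List.foldl_cons, List.filter_cons]
    by_cases hc : (PySem.List.pyGet? e.toList 0 == some '@') = true
    · rw [if_pos hc, hc]
      have := IH (d.modify a [] (fun v => v ++ [izlociBesedoA e])) k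
      rw [zankaBesedA] at this
      rw [this, PySem.Dict.getD_modify]
      by_cases hk : k = a
      · subst hk; simp
      · simp [hk]
    · rw [if_neg hc, Bool.of_not_eq_true hc]
      have := IH d k
      rw [zankaBesedA] at this
      rw [this]
      simp

theorem zankaBesedA_keys (a : String) (bs : List String) :
    ∀ (d : PySem.Dict String (List String)), d.contains a = true →
      (zankaBesedA a d bs).keys = d.keys ∧ (zankaBesedA a d bs).contains a = true := by
  induction bs with
  | nil => intro d h; exact ⟨rfl, h⟩
  | cons e bs IH =>
    intro d h
    rw [zankaBesedA, List.foldl_cons]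
    by_cases hc : (PySem.List.pyGet? e.toList 0 == some '@') = true
    · rw [if_pos hc]
      have h2 : (d.modify a [] (fun v => v ++ [izlociBesedoA e])).contains a = true := by
        rw [PySem.Dict.contains_modify]; simp
      have hk : (d.modify a [] (fun v => v ++ [izlociBesedoA e])).keys = d.keys := by
        rw [PySem.Dict.keys_modify, PySem.Dict.keys_insert_of_contains _ _ h]
      obtain ⟨k1, k2⟩ := IH _ h2
      rw [zankaBesedA] at k1 k2
      exact ⟨by rw [k1, hk], k2⟩
    · rw [if_neg hc]
      obtain ⟨k1, k2⟩ := IH d h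
      rw [zankaBesedA] at k1 k2
      exact ⟨k1, k2⟩

theorem zankaTvitovA_spec (a : String) (ts : List String) :
    ∀ (d : PySem.Dict String (List String)), d.contains a = true →
      ((zankaTvitovA ts a d).keys = d.keys ∧ (zankaTvitovA ts a d).contains a = true) ∧
      ∀ k, (zankaTvitovA ts a d).getD k [] = d.getD k [] ++ (if k = a then prispevek ts a else []) := by
  induction ts with
  | nil => intro d h; exact ⟨⟨rfl, h⟩, by intro k; simp [zankaTvitovA, prispevek]⟩
  | cons t ts IH =>
    intro d h
    rw [zankaTvitovA, List.foldl_cons]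
    simp only
    have hpr : prispevek (t :: ts) a =
        (if kljucT t = a then omembeT t else []) ++ prispevek ts a := by
      simp [prispevek]
    by_cases hc : (PySem.Str.slice (PySem.List.pyGetD (PySem.Str.split₀ t) 0 "") none (some (-1)) == a) = true
    · rw [if_pos hc]
      have hka : kljucT t = a := by
        have := hc; rw [beq_iff_eq] at this; exact this
      obtain ⟨hk, hcon⟩ := zankaBesedA_keys a (PySem.Str.split₀ t) d h
      obtain ⟨⟨k1, k2⟩, k3⟩ := IH (zankaBesedA a d (PySem.Str.split₀ t)) hcon
      rw [zankaTvitovA] at k1 k2 k3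
      refine ⟨⟨by rw [k1, hk], k2⟩, ?_⟩
      intro k
      rw [k3, zankaBesedA_getD, hpr, hka]
      by_cases hk' : k = a
      · subst hk'; simp [besedeT, omembeT]
      · simp [hk']
    · rw [if_neg hc]
      have hka : kljucT t ≠ a := by
        intro hh
        rw [show PySem.Str.slice (PySem.List.pyGetD (PySem.Str.split₀ t) 0 "") none (some (-1)) = kljucT t from rfl] at hc
        simp [hh] at hc
      obtain ⟨⟨k1, k2⟩, k3⟩ := IH d h
      rw [zankaTvitovA] at k1 k2 k3
      refine ⟨⟨k1, k2⟩, ?_⟩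
      intro k
      rw [k3, hpr]
      by_cases hk' : k = a
      · subst hk'; simp [hka]
      · simp [hk']

theorem outerA_spec (ts : List String) : ∀ (U : List String), U.Nodup →
    ∀ (d : PySem.Dict String (List String)), (∀ a ∈ U, d.contains a = false) →
      (U.foldl (fun slovar posamezniAvtor =>
          zankaTvitovA ts posamezniAvtor (slovar.insert posamezniAvtor [])) d).keys = d.keys ++ U ∧
      ∀ k, (U.foldl (fun slovar posamezniAvtor =>
          zankaTvitovA ts posamezniAvtor (slovar.insert posamezniAvtor [])) d).getD k [] =
        if k ∈ U then prispevek ts k else d.getD k [] := by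
  intro U
  induction U with
  | nil => intro _ d _; simp
  | cons a U IH =>
    intro hnd d hfresh
    rw [List.foldl_cons]
    have hfa : d.contains a = false := hfresh a (List.mem_cons_self)
    have hc1 : (d.insert a []).contains a = true := PySem.Dict.contains_insert_self d a []
    obtain ⟨⟨k1, _⟩, k3⟩ := zankaTvitovA_spec a ts (d.insert a []) hc1
    have hkeys2 : (zankaTvitovA ts a (d.insert a [])).keys = d.keys ++ [a] := by
      rw [k1, PySem.Dict.keys_insert_of_not_contains _ _ hfa]
    have hfresh2 : ∀ b ∈ U, (zankaTvitovA ts a (d.insert a [])).contains b = false := by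
      intro b hb
      have hba : b ≠ a := by
        intro hh; subst hh; exact (List.nodup_cons.mp hnd).1 hb
      have hbd : d.contains b = false := hfresh b (List.mem_cons_of_mem _ hb)
      rw [← Bool.not_eq_true]
      rw [PySem.Dict.contains_iff_mem_keys, hkeys2]
      intro hmem
      rcases List.mem_append.mp hmem with hm | hm
      · rw [← Bool.not_eq_true, PySem.Dict.contains_iff_mem_keys] at hbd
        exact hbd hm
      · exact hba (List.mem_singleton.mp hm)
    obtain ⟨r1, r2⟩ := IH (List.nodup_cons.mp hnd).2 _ hfresh2
    refine ⟨by rw [r1, hkeys2]; simp, ?_⟩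
    intro k
    rw [r2 k]
    by_cases hkU : k ∈ U
    · simp [hkU]
    · rw [if_neg hkU, k3 k]
      by_cases hka : k = a
      · subst hka
        simp [List.mem_cons, hkU]
      · simp only [List.mem_cons, hka, hkU, or_self, if_false]
        rw [PySem.Dict.getD_insert]
        simp [hka]

theorem unikatiA_eq_ofList (xs : List String) : unikatiA xs = PySem.Set.ofList xs := by
  rw [unikatiA, PySem.Set.ofList]
  congr 1
  funext s x
  rw [PySem.Set.add]
  by_cases h : x ∈ s <;> simp [h]

theorem vsiAvtorjiA_nodup (ts : List String) : (vsiAvtorjiA ts).Nodup := by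
  rw [vsiAvtorjiA, unikatiA_eq_ofList]
  exact PySem.Set.nodup_ofList _

theorem omembeTB (t : String) :
    ((PySem.Str.split₀ t).filter (fun b => PySem.Str.startswith b "@")).map jedroB = omembeT t := by
  rw [omembeT, besedeT]
  have hf : (PySem.Str.split₀ t).filter (fun b => PySem.Str.startswith b "@") =
      (PySem.Str.split₀ t).filter (fun e => PySem.List.pyGet? e.toList 0 == some '@') := by
    apply List.filter_congr
    intro b _
    rw [startswith_at_eq]
  rw [hf]
  apply List.map_congr_left
  intro b _
  exact strip_eq b

theorem pass1B_aux (ts : List String) : ∀ (d : PySem.Dict String (List String)),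
    ((ts.foldl (fun slovar tvit =>
        slovar.setdefault (PySem.List.pyGetD ((PySem.Str.split? tvit ":").getD []) 0 "") []) d).keys =
      (ts.map avtorA).foldl (fun acc x => if x ∈ acc then acc else acc ++ [x]) d.keys) ∧
    (∀ k, (ts.foldl (fun slovar tvit =>
        slovar.setdefault (PySem.List.pyGetD ((PySem.Str.split? tvit ":").getD []) 0 "") []) d).getD k [] = d.getD k []) := by
  induction ts with
  | nil => intro d; exact ⟨rfl, fun k => rfl⟩
  | cons t ts IH =>
    intro d
    rw [List.foldl_cons, List.map_cons, List.foldl_cons]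
    have ha : PySem.List.pyGetD ((PySem.Str.split? t ":").getD []) 0 "" = avtorA t := rfl
    obtain ⟨r1, r2⟩ := IH (d.setdefault (PySem.List.pyGetD ((PySem.Str.split? t ":").getD []) 0 "") [])
    constructor
    · rw [r1, ha, PySem.Dict.keys_setdefault]
      congr 1
      rw [PySem.Dict.contains_eq_decide_mem_keys]
      by_cases hm : avtorA t ∈ d.keys <;> simp [hm]
    · intro k
      rw [r2 k, ha]
      by_cases hk : k = avtorA t
      · subst hk
        rw [PySem.Dict.getD_setdefault_self]
      · rw [PySem.Dict.getD_eq_get?_getD, PySem.Dict.get?_setdefault_of_ne d [] hk,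
          ← PySem.Dict.getD_eq_get?_getD]

theorem prehod2B_eq (d : PySem.Dict String (List String)) (t : String) :
    prehod2B d t = if d.contains (kljucT t) = true then
        d.modify (kljucT t) [] (fun v =>
          v ++ ((PySem.Str.split₀ t).filter (fun b => PySem.Str.startswith b "@")).map jedroB)
      else d := rfl

theorem pass2B_spec (ts : List String) :
    ∀ (d : PySem.Dict String (List String)),
      (ts.foldl prehod2B d).keys = d.keys ∧
      ∀ k, (ts.foldl prehod2B d).getD k [] =
        d.getD k [] ++ ts.flatMap (fun t => if kljucT t = k ∧ k ∈ d.keys then omembeT t else []) := by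
  induction ts with
  | nil => intro d; exact ⟨rfl, by intro k; simp⟩
  | cons t ts IH =>
    intro d
    rw [List.foldl_cons]
    have hkt : PySem.Str.slice (PySem.List.pyGetD (PySem.Str.split₀ t) 0 "") none (some (-1)) = kljucT t := rfl
    by_cases hc : d.contains (kljucT t) = true
    · have hstep : prehod2B d t = d.modify (kljucT t) []
          (fun v => v ++ ((PySem.Str.split₀ t).filter (fun b => PySem.Str.startswith b "@")).map jedroB) := by
        rw [prehod2B_eq, if_pos hc]
      have hkeys : (prehod2B d t).keys = d.keys := by
        rw [hstep, PySem.Dict.keys_modify, PySem.Dict.keys_insert_of_contains _ _ hc]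
      obtain ⟨r1, r2⟩ := IH (prehod2B d t)
      refine ⟨by rw [r1, hkeys], ?_⟩
      intro k
      rw [r2 k, List.flatMap_cons, hkeys]
      rw [hstep, PySem.Dict.getD_modify, omembeTB]
      by_cases hk : k = kljucT t
      · have hmem : kljucT t ∈ d.keys := (PySem.Dict.contains_iff_mem_keys d (kljucT t)).mp hc
        rw [if_pos hk, hk]
        rw [if_pos ⟨rfl, hmem⟩, List.append_assoc]
      · have : ¬ (kljucT t = k ∧ k ∈ d.keys) := by
          intro hh; exact hk hh.1.symm
        rw [if_neg hk, if_neg this]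
        simp
    · have hstep : prehod2B d t = d := by
        rw [prehod2B_eq, if_neg hc]
      obtain ⟨r1, r2⟩ := IH d
      rw [hstep]
      refine ⟨r1, ?_⟩
      intro k
      rw [r2 k, List.flatMap_cons]
      have : ¬ (kljucT t = k ∧ k ∈ d.keys) := by
        intro hh
        rw [hh.1] at hc
        exact hc ((PySem.Dict.contains_iff_mem_keys d k).mpr hh.2)
      rw [if_neg this]
      simp

theorem omembe_eq_alt (tviti : List String) : omembe tviti = omembe_alt tviti := by
  have hmapA : tviti.foldl (fun seznamAvtorjev element => seznamAvtorjev ++ [avtorA element]) [] =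
      tviti.map avtorA := by
    have := PySem.List.foldl_append_singleton_eq_map (f := avtorA) (l := tviti) []
    simpa using this
  obtain ⟨a1, a2⟩ := outerA_spec tviti (vsiAvtorjiA tviti) (vsiAvtorjiA_nodup tviti)
    PySem.Dict.empty (by intro a _; rfl)
  obtain ⟨p1k, p1g⟩ := pass1B_aux tviti PySem.Dict.empty
  have hU : (tviti.foldl (fun slovar tvit =>
      slovar.setdefault (PySem.List.pyGetD ((PySem.Str.split? tvit ":").getD []) 0 "") [])
      (PySem.Dict.empty : PySem.Dict String (List String))).keys = vsiAvtorjiA tviti := by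
    rw [p1k, vsiAvtorjiA, hmapA, unikatiA, List.foldl_map, List.foldl_map]
    rfl
  obtain ⟨b1, b2⟩ := pass2B_spec tviti (tviti.foldl (fun slovar tvit =>
      slovar.setdefault (PySem.List.pyGetD ((PySem.Str.split? tvit ":").getD []) 0 "") [])
      (PySem.Dict.empty : PySem.Dict String (List String)))
  have hAkeys : ((vsiAvtorjiA tviti).foldl (fun slovar posamezniAvtor =>
      zankaTvitovA tviti posamezniAvtor (slovar.insert posamezniAvtor []))
      PySem.Dict.empty).keys = vsiAvtorjiA tviti := by
    rw [a1]; rfl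
  have hBkeys : (tviti.foldl prehod2B (tviti.foldl (fun slovar tvit =>
      slovar.setdefault (PySem.List.pyGetD ((PySem.Str.split? tvit ":").getD []) 0 "") [])
      (PySem.Dict.empty : PySem.Dict String (List String)))).keys = vsiAvtorjiA tviti := by
    rw [b1, hU]
  rw [omembe, omembe_alt]
  rw [PySem.Dict.items_eq_map_keys _ (by rw [hAkeys]; exact vsiAvtorjiA_nodup tviti) []]
  rw [PySem.Dict.items_eq_map_keys _ (by rw [hBkeys]; exact vsiAvtorjiA_nodup tviti) []]
  rw [hAkeys, hBkeys]
  apply List.map_congr_left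
  intro k hk
  have hflat : (fun t => if kljucT t = k ∧ k ∈ (tviti.foldl (fun slovar tvit =>
      slovar.setdefault (PySem.List.pyGetD ((PySem.Str.split? tvit ":").getD []) 0 "") [])
      (PySem.Dict.empty : PySem.Dict String (List String))).keys then omembeT t else []) =
      (fun t => if kljucT t = k then omembeT t else []) := by
    funext t
    rw [hU]
    by_cases h : kljucT t = k
    · simp [h, hk]
    · simp [h]
  rw [a2 k, if_pos hk, b2 k, p1g k, hflat]
  rw [show (PySem.Dict.empty : PySem.Dict String (List String)).getD k [] = [] from rfl]
  rw [prispevek, List.nil_append]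

-- ===== VERDICT (by name: the statement is the Claim_ definition above) =====
theorem omembe_spec : Claim_equal_omembe := by
  intro tviti _ _
  exact omembe_eq_alt tviti
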